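-- pv_equiv track=rewrite | github.com/umairimran/kaspaBot | app/flexible_embedder_simple.py | parse_kaspa_x_content
-- ===== SOURCE A (Python) =====
-- from typing import List, Dict, Any
--
-- def parse_kaspa_x_content(content: str) -> List[Dict[str, Any]]:
--     """Parse Kaspa X content into flexible chunks using simple string operations."""
--
--     lines = content.strip().split('\n')
--     chunks = []
--
--     current_section = None
--     current_content = []
--
--     for i, line in enumerate(lines):
--         line = line.strip()
--         if not line:
--             continue
--
--         # Check if this is a numbered point using simple string operations
--         if (line.startswith('1)') or line.startswith('2)') or line.startswith('3)') or
--             line.startswith('4)') or line.startswith('5)') or line.startswith('6)') or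
--             line.startswith('7)') or line.startswith('8)') or line.startswith('9)') or
--             line.startswith('10)')):
--
--             # Save previous section if exists
--             if current_section and current_content:
--                 chunks.append({
--                     "id": f"kaspa_x_{current_section}",
--                     "content": "\n".join(current_content),
--                     "source": "kaspa_x_twitter",
--                     "section": f"FUD {current_section}",
--                     "url": "https://x.com/dotkrueger/status/1956843811679989918"
--                 })
--
--             # Start new section
--             # Extract the number
--             point_num = line.split(')')[0]
--
--             # Extract the claim (everything between quotes)
--             start_quote = line.find('"')
--             end_quote = line.rfind('"')
--             if start_quote != -1 and end_quote != -1 and end_quote > start_quote: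
--                 claim = line[start_quote+1:end_quote]
--             else:
--                 claim = line.split(')')[1].strip()
--
--             current_section = point_num
--             current_content = [f"FUD {point_num}: {claim}"]
--
--         elif current_section:
--             # Add line to current section
--             current_content.append(line)
--
--     # Add the last section
--     if current_section and current_content:
--         chunks.append({
--             "id": f"kaspa_x_{current_section}",
--             "content": "\n".join(current_content),
--             "source": "kaspa_x_twitter",
--             "section": f"FUD {current_section}",
--             "url": "https://x.com/dotkrueger/status/1956843811679989918"
--         })
--
--     return chunks
-- ===== SOURCE B (Python) =====
-- HEADERS = ("1)", "2)", "3)", "4)", "5)", "6)", "7)", "8)", "9)", "10)")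
-- URL = "https://x.com/dotkrueger/status/1956843811679989918"
--
--
-- def _is_header(line):
--     return line.startswith(HEADERS)
--
--
-- def _claim(line):
--     start = line.find('"')
--     end = line.rfind('"')
--     if 0 <= start < end:
--         return line[start + 1:end]
--     return line.split(')')[1].strip()
--
--
-- def _chunk(header_line, body):
--     num = header_line.split(')')[0]
--     return {
--         "id": "kaspa_x_%s" % num,
--         "content": "\n".join(["FUD %s: %s" % (num, _claim(header_line))] + body),
--         "source": "kaspa_x_twitter",
--         "section": "FUD %s" % num,
--         "url": URL,
--     }
--
--
-- def parse_kaspa_x_content(content):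
--     """Two-pointer boundary segmentation: locate each header index, slice the
--     body lines up to the next header, and format that slice as a chunk."""
--     lines = [s for s in (ln.strip() for ln in content.strip().split('\n')) if s]
--     n = len(lines)
--     out = []
--     i = 0
--     while i < n and not _is_header(lines[i]):
--         i += 1
--     while i < n:
--         j = i + 1
--         while j < n and not _is_header(lines[j]):
--             j += 1
--         out.append(_chunk(lines[i], lines[i + 1:j]))
--         i = j
--     return out
-- ===== Notes on version B (the rewrite author's own statement) =====
-- stated objective: alternative
-- what changed: Replaces A's single emit-on-boundary accumulator scan (current_section/current_content state plus a trailing flush) with stateless two-pointer boundary segmentation: after cleaning the lines, an index pointer locates each header, an inner pointer finds the next header, and the slice between them is formatted directly into a chunk.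
import Mathlib
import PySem

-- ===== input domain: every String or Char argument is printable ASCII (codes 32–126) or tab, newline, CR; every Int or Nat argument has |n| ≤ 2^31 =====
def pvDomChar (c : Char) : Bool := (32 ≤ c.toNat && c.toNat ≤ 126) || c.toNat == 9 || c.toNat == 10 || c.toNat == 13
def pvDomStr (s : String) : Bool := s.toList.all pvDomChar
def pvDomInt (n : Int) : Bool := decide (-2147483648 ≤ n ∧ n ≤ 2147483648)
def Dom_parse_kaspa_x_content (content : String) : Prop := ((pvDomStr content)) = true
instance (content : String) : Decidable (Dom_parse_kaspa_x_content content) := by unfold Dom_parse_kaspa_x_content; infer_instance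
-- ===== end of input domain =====

-- ===== PORT A =====
-- B re-implements A's accumulator-with-trailing-flush scan as stateless two-pointer
-- boundary segmentation over the cleaned lines (objective: alternative decomposition).
-- Neither program mutates its argument.

-- A-side helpers (the duplicated flush block and the long header test of the Python source)
def pvChunkA (s : String) (cont : List String) : List (String × String) :=
  [("id", PySem.Str.join "" ["kaspa_x_", s]),
   ("content", PySem.Str.join "\n" cont),
   ("source", "kaspa_x_twitter"),
   ("section", PySem.Str.join "" ["FUD ", s]),
   ("url", "https://x.com/dotkrueger/status/1956843811679989918")]

def pvIsHeaderA (line : String) : Bool :=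
  PySem.Str.startswith line "1)" || PySem.Str.startswith line "2)" || PySem.Str.startswith line "3)" ||
  PySem.Str.startswith line "4)" || PySem.Str.startswith line "5)" || PySem.Str.startswith line "6)" ||
  PySem.Str.startswith line "7)" || PySem.Str.startswith line "8)" || PySem.Str.startswith line "9)" ||
  PySem.Str.startswith line "10)"

-- 'if current_section and current_content: chunks.append({...})' (appears twice in the Python)
def pvFlushA (st : List (List (String × String)) × Option String × List String) : List (List (String × String)) :=
  match st.2.1 with
  | some s => if s ≠ "" ∧ st.2.2 ≠ [] then st.1 ++ [pvChunkA s st.2.2] else st.1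
  | none => st.1

-- the loop body for a stripped, non-empty line
def pvStepA (st : List (List (String × String)) × Option String × List String) (line : String) :
    List (List (String × String)) × Option String × List String :=
  if pvIsHeaderA line then
    let chunks := pvFlushA st
    -- line contains ')' here, so split? is some and part 0 exists: getD/pyGetD are exact
    let parts := (PySem.Str.split? line ")").getD []
    let point_num := PySem.List.pyGetD parts 0 ""
    let start_quote := PySem.Str.find line "\""
    let end_quote := PySem.Str.rfind line "\""
    let claim :=
      if start_quote ≠ -1 ∧ end_quote ≠ -1 ∧ end_quote > start_quote then
        PySem.Str.slice line (some (start_quote + 1)) (some end_quote)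
      else
        PySem.Str.strip (PySem.List.pyGetD parts 1 "")
    (chunks, some point_num, [PySem.Str.join "" ["FUD ", point_num, ": ", claim]])
  else
    match st.2.1 with
    | some s => if s ≠ "" then (st.1, some s, st.2.2 ++ [line]) else st
    | none => st

def parse_kaspa_x_content (content : String) : List (List (String × String)) :=
  -- content.strip().split('\n'): sep is the non-empty literal '\n', so split? is some and getD [] is exact
  let lines := (PySem.Str.split? (PySem.Str.strip content) "\n").getD []
  let st := lines.foldl
    (fun st line0 =>
      let line := PySem.Str.strip line0
      if line = "" then st else pvStepA st line)
    ([], none, [])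
  pvFlushA st

-- ===== PORT B =====
def pvHeaders : List String := ["1)", "2)", "3)", "4)", "5)", "6)", "7)", "8)", "9)", "10)"]

-- line.startswith(HEADERS): any of the ten prefixes
def pvIsHeaderB (line : String) : Bool :=
  pvHeaders.any (fun p => PySem.Str.startswith line p)

def pvClaimB (line : String) : String :=
  let start := PySem.Str.find line "\""
  let stop := PySem.Str.rfind line "\""
  if 0 ≤ start ∧ start < stop then
    PySem.Str.slice line (some (start + 1)) (some stop)
  else
    PySem.Str.strip (PySem.List.pyGetD ((PySem.Str.split? line ")").getD []) 1 "")

def pvNumB (line : String) : String :=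
  PySem.List.pyGetD ((PySem.Str.split? line ")").getD []) 0 ""

def pvSeedB (line : String) : String :=
  PySem.Str.join "" ["FUD ", pvNumB line, ": ", pvClaimB line]

-- _chunk(header_line, body)
def pvChunkB (num : String) (body : List String) : List (String × String) :=
  [("id", PySem.Str.join "" ["kaspa_x_", num]),
   ("content", PySem.Str.join "\n" body),
   ("source", "kaspa_x_twitter"),
   ("section", PySem.Str.join "" ["FUD ", num]),
   ("url", "https://x.com/dotkrueger/status/1956843811679989918")]

-- the index loops of Source B as structural recursion: a non-header head is skipped
-- (the leading while), a header head takes the body up to the next header (the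
-- inner while j / slice lines[i+1:j]) and continues at that next header (i = j)
def pvSegB : List String → List (List (String × String))
  | [] => []
  | l :: ls =>
    if pvIsHeaderB l then
      pvChunkB (pvNumB l) (pvSeedB l :: ls.takeWhile (fun x => !pvIsHeaderB x))
        :: pvSegB (ls.dropWhile (fun x => !pvIsHeaderB x))
    else
      pvSegB ls
termination_by ls => ls.length
decreasing_by
  · simpa using Nat.lt_succ_of_le (List.length_dropWhile_le _ _)
  · simp

def parse_kaspa_x_content_alt (content : String) : List (List (String × String)) :=
  pvSegB ((((PySem.Str.split? (PySem.Str.strip content) "\n").getD []).map PySem.Str.strip).filter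
    (fun l => l != ""))

-- ===== PRECONDITION & SPEC =====
def Spec_parse_kaspa_x_content (content : String) (out : List (List (String × String))) : Prop := out = parse_kaspa_x_content_alt content
instance (content : String) (out : List (List (String × String))) : Decidable (Spec_parse_kaspa_x_content content out) := by unfold Spec_parse_kaspa_x_content; infer_instance

-- ===== CLAIM (what is proved, stated in full; the proofs are below) =====
def Claim_equal_parse_kaspa_x_content : Prop := ∀ (content : String), Dom_parse_kaspa_x_content content → Spec_parse_kaspa_x_content content (parse_kaspa_x_content content)

-- ===== LEMMAS AND PROOFS =====

-- proof-side intermediate: A's scan rephrased as a fold building (number, body) groups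
def pvAddLast (groups : List (String × List String)) (line : String) : List (String × List String) :=
  match groups with
  | [] => []
  | [(n, b)] => [(n, b ++ [line])]
  | g :: gs => g :: pvAddLast gs line

def pvStepG (groups : List (String × List String)) (line : String) : List (String × List String) :=
  if pvIsHeaderB line then
    groups ++ [(pvNumB line, [pvSeedB line])]
  else
    pvAddLast groups line

-- the state pvInv relates A's accumulator to the group list
def pvInv (st : List (List (String × String)) × Option String × List String)
    (groups : List (String × List String)) : Prop :=
  (groups = [] ∧ st = ([], none, [])) ∨
  (∃ gs s body, groups = gs ++ [(s, body)] ∧ s ≠ "" ∧ body ≠ [] ∧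
    st = (gs.map (fun g => pvChunkB g.1 g.2), some s, body))

lemma pvGoShape (sep : List Char) : ∀ (fuel : Nat) (l cur : List Char) (acc : List (List Char)),
    ∃ first rest, PySem.Chars.splitOn.go sep fuel l cur acc =
      acc.reverse ++ (cur.reverse ++ first) :: rest := by
  intro fuel
  induction fuel with
  | zero => intro l cur acc; exact ⟨l, [], by simp [PySem.Chars.splitOn.go]⟩
  | succ n ih =>
    intro l cur acc
    cases l with
    | nil => exact ⟨[], [], by simp [PySem.Chars.splitOn.go]⟩
    | cons c rest =>
      by_cases hp : sep.isPrefixOf (c :: rest) = true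
      · obtain ⟨f', r', h⟩ := ih (List.drop sep.length (c :: rest)) [] (cur.reverse :: acc)
        refine ⟨[], f' :: r', ?_⟩
        simp only [PySem.Chars.splitOn.go, hp, if_true, h]
        simp
      · obtain ⟨f', r', h⟩ := ih rest (c :: cur) acc
        refine ⟨c :: f', r', ?_⟩
        simp only [PySem.Chars.splitOn.go, hp, h]
        simp

lemma pvSplitOnHead (c : Char) (cs : List Char) (hc : c ≠ ')') :
    ∃ first rest, PySem.Chars.splitOn (c :: cs) [')'] = (c :: first) :: rest := by
  obtain ⟨f', r', h⟩ := pvGoShape [')'] (cs.length + 1) cs [c] []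
  refine ⟨f', r', ?_⟩
  have hpre : [')'].isPrefixOf (c :: cs) = false := by
    simp [List.isPrefixOf, Ne.symm hc]
  show PySem.Chars.splitOn.go [')'] ((c :: cs).length + 1) (c :: cs) [] [] = _
  simp only [List.length_cons]
  simp only [PySem.Chars.splitOn.go, hpre]
  rw [if_neg (by simp)]
  simpa using h

lemma pvHeaderFirstChar (line : String)
    (h : pvIsHeaderB line = true) :
    ∃ c t, line.toList = c :: t ∧ c ≠ ')' := by
  rw [pvIsHeaderB, List.any_eq_true] at h
  obtain ⟨p, hp, hs⟩ := h
  have hph : p.toList.head? ≠ some ')' ∧ p.toList ≠ [] := by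
    fin_cases hp <;> exact ⟨by decide, by decide⟩
  rw [PySem.Str.startswith_eq, PySem.Chars.startswith_iff] at hs
  obtain ⟨t, ht⟩ := hs
  cases hpl : p.toList with
  | nil => exact absurd hpl hph.2
  | cons c pr =>
    refine ⟨c, pr ++ t, ?_, ?_⟩
    · rw [← ht, hpl]; simp
    · intro he; apply hph.1; rw [hpl, he]; rfl

lemma pvPointNumNe (line : String)
    (h : pvIsHeaderB line = true) : pvNumB line ≠ "" := by
  obtain ⟨c, t, hline, hc⟩ := pvHeaderFirstChar line h
  obtain ⟨first, rest, hsplit⟩ := pvSplitOnHead c t hc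
  have hm := PySem.Str.split?_map line ")"
  rw [show (")" : String).toList = [')'] from rfl] at hm
  rw [hline, PySem.Chars.split?] at hm
  simp only [List.isEmpty_cons] at hm
  rw [hsplit] at hm
  cases hs : PySem.Str.split? line ")" with
  | none => rw [hs] at hm; simp at hm
  | some parts =>
    rw [hs] at hm
    simp only [Option.map_some] at hm
    cases parts with
    | nil => simp at hm
    | cons p0 ps =>
      simp only [List.map_cons, if_neg (by simp : ¬ false = true), Option.some.injEq,
        List.cons.injEq] at hm
      have hp0 : p0.toList = c :: first := hm.1
      rw [pvNumB, hs]
      simp only [Option.getD_some]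
      rw [PySem.List.pyGetD_zero_cons]
      intro he
      rw [he] at hp0
      simp at hp0

lemma pvHeaderEq (line : String) : pvIsHeaderA line = pvIsHeaderB line := by
  simp [pvIsHeaderA, pvIsHeaderB, pvHeaders, Bool.or_assoc]

lemma pvClaimEq (line : String) :
    (if PySem.Str.find line "\"" ≠ -1 ∧ PySem.Str.rfind line "\"" ≠ -1 ∧
        PySem.Str.rfind line "\"" > PySem.Str.find line "\"" then
      PySem.Str.slice line (some (PySem.Str.find line "\"" + 1)) (some (PySem.Str.rfind line "\""))
    else
      PySem.Str.strip (PySem.List.pyGetD ((PySem.Str.split? line ")").getD []) 1 "")) =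
    pvClaimB line := by
  have h1 : (-1 : Int) ≤ PySem.Str.find line "\"" := by
    rw [PySem.Str.find_eq]; exact PySem.Chars.neg_one_le_find _ _
  have hiff : (PySem.Str.find line "\"" ≠ -1 ∧ PySem.Str.rfind line "\"" ≠ -1 ∧
      PySem.Str.rfind line "\"" > PySem.Str.find line "\"") ↔
      (0 ≤ PySem.Str.find line "\"" ∧ PySem.Str.find line "\"" < PySem.Str.rfind line "\"") := by
    omega
  simp only [pvClaimB]
  rw [if_congr hiff rfl rfl]

lemma pvAddLastAppend (gs : List (String × List String)) (s : String) (b : List String) (l : String) :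
    pvAddLast (gs ++ [(s, b)]) l = gs ++ [(s, b ++ [l])] := by
  induction gs with
  | nil => rfl
  | cons g gs ih =>
    cases gs with
    | nil => simp [pvAddLast]
    | cons g2 gs2 =>
      rw [List.cons_append, List.cons_append]
      show g :: pvAddLast (g2 :: gs2 ++ [(s, b)]) l = _
      rw [ih]
      rfl

lemma pvFlushInv (st : List (List (String × String)) × Option String × List String)
    (groups : List (String × List String)) (h : pvInv st groups) :
    pvFlushA st = groups.map (fun g => pvChunkB g.1 g.2) := by
  rcases h with ⟨hg, hst⟩ | ⟨gs, sec, body, hg, hs, hb, hst⟩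
  · subst hg hst; rfl
  · subst hg hst
    simp [pvFlushA, hs, hb, pvChunkA, pvChunkB]

lemma pvStepInv (st : List (List (String × String)) × Option String × List String)
    (groups : List (String × List String)) (line : String) (h : pvInv st groups) :
    pvInv (pvStepA st line) (pvStepG groups line) := by
  by_cases hh : pvIsHeaderB line = true
  · have hA : pvIsHeaderA line = true := by rw [pvHeaderEq]; exact hh
    simp only [pvStepA, pvStepG, hA, hh, if_true]
    right
    refine ⟨groups, _, _, rfl, pvPointNumNe line hh, by simp, ?_⟩
    rw [pvFlushInv st groups h, pvClaimEq]
    rfl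
  · have hA : pvIsHeaderA line = false := by
      rw [pvHeaderEq]; exact Bool.not_eq_true _ ▸ eq_false_of_ne_true hh
    simp only [pvStepA, pvStepG, hA, Bool.false_eq_true, if_false,
      eq_false_of_ne_true hh]
    rcases h with ⟨hg, hst⟩ | ⟨gs, sec, body, hg, hsne, hb, hst⟩
    · subst hg hst
      exact Or.inl ⟨rfl, rfl⟩
    · subst hg hst
      right
      refine ⟨gs, sec, body ++ [line], pvAddLastAppend gs sec body line, hsne, by simp, ?_⟩
      simp [hsne]

lemma pvFoldInv (lines : List String) :
    ∀ st groups, pvInv st groups → pvInv (lines.foldl pvStepA st) (lines.foldl pvStepG groups) := by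
  induction lines with
  | nil => intro st groups h; exact h
  | cons l ls ih =>
    intro st groups h
    exact ih _ _ (pvStepInv st groups l h)

lemma pvStripFilterFoldl {σ : Type}
    (g : σ → String → σ) (xs : List String) : ∀ (st : σ),
    xs.foldl (fun st x =>
      let line := PySem.Str.strip x
      if line = "" then st else g st line) st =
      ((xs.map PySem.Str.strip).filter (fun l => l != "")).foldl g st := by
  induction xs with
  | nil => intro st; rfl
  | cons x xs ih =>
    intro st
    by_cases hx : PySem.Str.strip x = "" <;>
      simp [hx, ih]

-- the group fold with a last open group equals: extend that group with the
-- body up to the next header, then segment the rest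
lemma pvFoldSeg (ls : List String) :
    ∀ (gs : List (String × List String)) (s : String) (b : List String),
    ((ls.foldl pvStepG (gs ++ [(s, b)])).map (fun g => pvChunkB g.1 g.2)) =
      gs.map (fun g => pvChunkB g.1 g.2) ++
        pvChunkB s (b ++ ls.takeWhile (fun x => !pvIsHeaderB x))
          :: pvSegB (ls.dropWhile (fun x => !pvIsHeaderB x)) := by
  induction ls with
  | nil => intro gs s b; simp [pvSegB]
  | cons l ls ih =>
    intro gs s b
    by_cases hh : pvIsHeaderB l = true
    · have h1 : (l :: ls).foldl pvStepG (gs ++ [(s, b)]) =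
          ls.foldl pvStepG ((gs ++ [(s, b)]) ++ [(pvNumB l, [pvSeedB l])]) := by
        simp [pvStepG, hh]
      rw [h1, ih]
      simp [pvSegB, hh, List.takeWhile, List.dropWhile]
    · have hb : pvIsHeaderB l = false := eq_false_of_ne_true hh
      have h1 : (l :: ls).foldl pvStepG (gs ++ [(s, b)]) =
          ls.foldl pvStepG (gs ++ [(s, b ++ [l])]) := by
        simp [pvStepG, hb, pvAddLastAppend]
      rw [h1, ih]
      simp [List.takeWhile, List.dropWhile, hb]

lemma pvGroupsSeg (ls : List String) :
    ((ls.foldl pvStepG []).map (fun g => pvChunkB g.1 g.2)) = pvSegB ls := by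
  induction ls with
  | nil => simp [pvSegB]
  | cons l ls ih =>
    by_cases hh : pvIsHeaderB l = true
    · have h1 : (l :: ls).foldl pvStepG [] =
          ls.foldl pvStepG ([] ++ [(pvNumB l, [pvSeedB l])]) := by
        simp [pvStepG, hh]
      rw [h1, pvFoldSeg]
      simp [pvSegB, hh]
    · have hb : pvIsHeaderB l = false := eq_false_of_ne_true hh
      have h1 : (l :: ls).foldl pvStepG [] = ls.foldl pvStepG [] := by
        simp [pvStepG, hb, pvAddLast]
      rw [h1, ih]
      simp [pvSegB, hb]

-- ===== VERDICT (by name: the statement is the Claim_ definition above) =====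
theorem parse_kaspa_x_content_spec : Claim_equal_parse_kaspa_x_content := by
  intro content _
  unfold Spec_parse_kaspa_x_content
  simp only [parse_kaspa_x_content, parse_kaspa_x_content_alt]
  rw [pvStripFilterFoldl pvStepA]
  rw [pvFlushInv _ _ (pvFoldInv _ ([], none, []) [] (Or.inl ⟨rfl, rfl⟩))]
  exact pvGroupsSeg _
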